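-- pv_equiv track=rewrite | github.com/WellsCui/python-demos | org/wells/examples/grids.py | mine_gold
-- ===== SOURCE A (Python) =====
-- def mine_gold(matrix):
--     row_size = len(matrix)
--     col_size = len(matrix[0])
--
--     def mine(row, col):
--         if col >= col_size:
--             return 0
--         right_mine = mine(row, col + 1)
--         up_right_mine = 0 if row == 0 else mine(row - 1, col + 1)
--         down_right_mine = 0 if row == row_size - 1 else mine(row + 1, col + 1)
--         return matrix[row][col] + max(right_mine, up_right_mine, down_right_mine)
--
--     max_mine = 0
--     for begin_row in range(row_size):
--         result = mine(begin_row, 0)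
--         max_mine = result if result > max_mine else max_mine
--     return max_mine
-- ===== SOURCE B (Python) =====
-- def mine_gold(matrix):
--     rows = len(matrix)
--     cols = len(matrix[0])
--     dp = [0] * rows
--     col = cols - 1
--     while col >= 0:
--         dp = [matrix[r][col]
--               + max(dp[r],
--                     dp[r - 1] if r > 0 else 0,
--                     dp[r + 1] if r < rows - 1 else 0)
--               for r in range(rows)]
--         col -= 1
--     best = 0
--     for v in dp:
--         if v > best:
--             best = v
--     return best
-- ===== Notes on version B (the rewrite author's own statement) =====
-- stated objective: faster
-- what changed: Replaced the exponential three-way recursion per start row by a single bottom-up DP pass over columns right-to-left, keeping one array of best-from-here values per row.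
import Mathlib
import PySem

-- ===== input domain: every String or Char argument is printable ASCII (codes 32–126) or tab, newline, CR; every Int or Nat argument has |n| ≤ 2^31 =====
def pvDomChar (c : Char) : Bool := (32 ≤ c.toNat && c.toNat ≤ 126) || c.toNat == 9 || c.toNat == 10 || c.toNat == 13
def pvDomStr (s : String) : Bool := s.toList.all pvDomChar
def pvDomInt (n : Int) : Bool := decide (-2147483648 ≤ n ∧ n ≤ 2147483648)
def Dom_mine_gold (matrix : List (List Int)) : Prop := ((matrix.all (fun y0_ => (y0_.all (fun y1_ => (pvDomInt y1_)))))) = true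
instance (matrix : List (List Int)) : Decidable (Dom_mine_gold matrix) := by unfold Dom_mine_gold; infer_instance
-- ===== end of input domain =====

-- B replaces A's exponential three-way recursion by a bottom-up DP over columns (one
-- array of best-from-here values per row), right to left: asymptotically faster.

-- ===== PORT A =====
-- inner recursive function mine(row, col); recursion proceeds rightward in col
def pvMineA (matrix : List (List Int)) (row_size col_size : Int) (row col : Int) : Int :=
  if _h : col ≥ col_size then 0
  else
    let right_mine := pvMineA matrix row_size col_size row (col + 1)
    let up_right_mine := if row = 0 then 0 else pvMineA matrix row_size col_size (row - 1) (col + 1)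
    let down_right_mine := if row = row_size - 1 then 0 else pvMineA matrix row_size col_size (row + 1) (col + 1)
    PySem.List.pyGetD (PySem.List.pyGetD matrix row []) col 0 +
      max right_mine (max up_right_mine down_right_mine)
termination_by (col_size - col).toNat
decreasing_by all_goals omega

def mine_gold (matrix : List (List Int)) : Int :=
  let row_size : Int := matrix.length
  let col_size : Int := (PySem.List.pyGetD matrix 0 []).length
  (PySem.List.pyRange 0 row_size 1).foldl
    (fun max_mine begin_row =>
      let result := pvMineA matrix row_size col_size begin_row 0
      if result > max_mine then result else max_mine) 0

-- ===== PORT B =====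
-- body of the while loop: dp = [matrix[r][col] + max(...) for r in range(rows)]
def pvAltStep (matrix : List (List Int)) (rows : Int) (dp : List Int) (col : Int) : List Int :=
  (PySem.List.pyRange 0 rows 1).map (fun r =>
    PySem.List.pyGetD (PySem.List.pyGetD matrix r []) col 0 +
      max (PySem.List.pyGetD dp r 0)
        (max (if r > 0 then PySem.List.pyGetD dp (r - 1) 0 else 0)
             (if r < rows - 1 then PySem.List.pyGetD dp (r + 1) 0 else 0)))

-- the while loop: col counts down from cols-1 to 0
def pvAltLoop (matrix : List (List Int)) (rows : Int) (dp : List Int) (col : Int) : List Int :=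
  if _h : col ≥ 0 then pvAltLoop matrix rows (pvAltStep matrix rows dp col) (col - 1) else dp
termination_by (col + 1).toNat
decreasing_by omega

def mine_gold_alt (matrix : List (List Int)) : Int :=
  let rows : Int := matrix.length
  let cols : Int := (PySem.List.pyGetD matrix 0 []).length
  let dp := pvAltLoop matrix rows (List.replicate rows.toNat 0) (cols - 1)
  dp.foldl (fun best v => if v > best then v else best) 0

-- ===== PRECONDITION & SPEC =====
-- A (and B) raise IndexError on an empty matrix (matrix[0]) and on a matrix with a
-- row shorter than row 0 (matrix[row][col]); Pre_ excludes exactly those inputs.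
def Pre_mine_gold (matrix : List (List Int)) : Prop :=
  matrix ≠ [] ∧ ∀ row ∈ matrix, (matrix.headD []).length ≤ row.length
instance (matrix : List (List Int)) : Decidable (Pre_mine_gold matrix) := by
  unfold Pre_mine_gold; infer_instance
def pvWitness_mine_gold : List (List Int) := [[1, 2], [3, 4]]

def Spec_mine_gold (matrix : List (List Int)) (out : Int) : Prop := out = mine_gold_alt matrix
instance (matrix : List (List Int)) (out : Int) : Decidable (Spec_mine_gold matrix out) := by unfold Spec_mine_gold; infer_instance

-- ===== CLAIM (what is proved, stated in full; the proofs are below) =====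
def Claim_equal_mine_gold : Prop := ∀ (matrix : List (List Int)), Dom_mine_gold matrix → Pre_mine_gold matrix → Spec_mine_gold matrix (mine_gold matrix)

-- ===== LEMMAS AND PROOFS =====

-- vector of mine(r, c) over all rows r, as produced column by column by B's loop
def pvMineVec (matrix : List (List Int)) (c : Int) : List Int :=
  (PySem.List.pyRange 0 (matrix.length : Int) 1).map
    (fun r => pvMineA matrix (matrix.length : Int) ((PySem.List.pyGetD matrix 0 []).length : Int) r c)

lemma pvMineVec_cols (matrix : List (List Int)) :
    pvMineVec matrix ((PySem.List.pyGetD matrix 0 []).length : Int)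
      = List.replicate matrix.length 0 := by
  unfold pvMineVec
  have h : ∀ r : Int, pvMineA matrix (matrix.length : Int)
      ((PySem.List.pyGetD matrix 0 []).length : Int) r
      ((PySem.List.pyGetD matrix 0 []).length : Int) = 0 := by
    intro r; rw [pvMineA]; simp
  simp [h, List.map_const', PySem.List.length_pyRange_one]

lemma pvStep_eq (matrix : List (List Int)) (c : Int) (_h0 : 0 ≤ c)
    (hc : c < ((PySem.List.pyGetD matrix 0 []).length : Int)) :
    pvAltStep matrix (matrix.length : Int) (pvMineVec matrix (c + 1)) c
      = pvMineVec matrix c := by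
  unfold pvAltStep pvMineVec
  apply List.map_congr_left
  intro r hr
  rw [PySem.List.mem_pyRange_one] at hr
  conv_rhs => rw [pvMineA]
  rw [dif_neg (by omega)]
  rw [PySem.List.pyGetD_map_pyRange_of_nonneg _ _ _ _ hr.1 hr.2]
  have e1 : (if r > 0 then
        PySem.List.pyGetD ((PySem.List.pyRange 0 (matrix.length : Int) 1).map
          (fun r => pvMineA matrix (matrix.length : Int)
            ((PySem.List.pyGetD matrix 0 []).length : Int) r (c + 1))) (r - 1) 0
      else 0)
      = (if r = 0 then 0 else pvMineA matrix (matrix.length : Int)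
          ((PySem.List.pyGetD matrix 0 []).length : Int) (r - 1) (c + 1)) := by
    by_cases h0 : r = 0
    · simp [h0]
    · rw [if_pos (by omega), if_neg h0,
        PySem.List.pyGetD_map_pyRange_of_nonneg _ _ _ _ (by omega) (by omega)]
  have e2 : (if r < (matrix.length : Int) - 1 then
        PySem.List.pyGetD ((PySem.List.pyRange 0 (matrix.length : Int) 1).map
          (fun r => pvMineA matrix (matrix.length : Int)
            ((PySem.List.pyGetD matrix 0 []).length : Int) r (c + 1))) (r + 1) 0
      else 0)
      = (if r = (matrix.length : Int) - 1 then 0 else pvMineA matrix (matrix.length : Int)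
          ((PySem.List.pyGetD matrix 0 []).length : Int) (r + 1) (c + 1)) := by
    by_cases h1 : r = (matrix.length : Int) - 1
    · simp [h1]
    · rw [if_pos (by omega), if_neg h1,
        PySem.List.pyGetD_map_pyRange_of_nonneg _ _ _ _ (by omega) (by omega)]
  rw [e1, e2]

lemma pvLoop_eq (matrix : List (List Int)) (c : Int) (h1 : -1 ≤ c)
    (hc : c < ((PySem.List.pyGetD matrix 0 []).length : Int)) :
    pvAltLoop matrix (matrix.length : Int) (pvMineVec matrix (c + 1)) c
      = pvMineVec matrix 0 := by
  obtain ⟨k, hk⟩ : ∃ k : Nat, c + 1 = k := ⟨(c + 1).toNat, by omega⟩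
  induction k generalizing c with
  | zero =>
    have hc1 : c = -1 := by omega
    subst hc1
    rw [pvAltLoop, dif_neg (by omega)]
    norm_num
  | succ k ih =>
    rw [pvAltLoop, dif_pos (by omega), pvStep_eq matrix c (by omega) hc]
    have h := ih (c - 1) (by omega) (by omega) (by omega)
    have hcc : c - 1 + 1 = c := by omega
    rw [hcc] at h
    exact h

-- ===== VERDICT (by name: the statement is the Claim_ definition above) =====
theorem mine_gold_spec : Claim_equal_mine_gold := by
  intro matrix _ _
  show mine_gold matrix = mine_gold_alt matrix
  unfold mine_gold mine_gold_alt
  simp only [Int.toNat_natCast]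
  rw [← pvMineVec_cols matrix]
  have hL := pvLoop_eq matrix (((PySem.List.pyGetD matrix 0 []).length : Int) - 1)
    (by omega) (by omega)
  rw [show (((PySem.List.pyGetD matrix 0 []).length : Int) - 1) + 1
      = ((PySem.List.pyGetD matrix 0 []).length : Int) from by ring] at hL
  rw [hL]
  unfold pvMineVec
  rw [List.foldl_map]
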